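-- pv_equiv track=rewrite | github.com/sunwookim028/bril | tasks/dom.py | map_to_dominatees
-- ===== SOURCE A (Python) =====
-- def map_to_dominatees(map_to_dom):
--   from collections import defaultdict #AIGEN whole body
--   map_to_dominatees = defaultdict(set)
--   n_v = len(map_to_dom)
--   for dominator in range(n_v):
--     for v_j in range(n_v):
--       if dominator in map_to_dom[v_j]:
--         map_to_dominatees[dominator].add(v_j)
--   return dict(map_to_dominatees)
-- ===== SOURCE B (Python) =====
-- def map_to_dominatees(map_to_dom):
--     n_v = len(map_to_dom)
--     buckets = [set() for _ in range(n_v)]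
--     for v_j, doms in enumerate(map_to_dom):
--         for d in doms:
--             if 0 <= d < n_v:
--                 buckets[d].add(v_j)
--     return {d: b for d, b in enumerate(buckets) if b}
-- ===== Notes on version B (the rewrite author's own statement) =====
-- stated objective: alternative
-- what changed: Instead of A's nested scan testing every (dominator, node) index pair against the node's dominator set, B makes one pass over the nodes and directly inverts each node's dominator set into per-dominator buckets, then emits the non-empty buckets in ascending key order.
import Mathlib
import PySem

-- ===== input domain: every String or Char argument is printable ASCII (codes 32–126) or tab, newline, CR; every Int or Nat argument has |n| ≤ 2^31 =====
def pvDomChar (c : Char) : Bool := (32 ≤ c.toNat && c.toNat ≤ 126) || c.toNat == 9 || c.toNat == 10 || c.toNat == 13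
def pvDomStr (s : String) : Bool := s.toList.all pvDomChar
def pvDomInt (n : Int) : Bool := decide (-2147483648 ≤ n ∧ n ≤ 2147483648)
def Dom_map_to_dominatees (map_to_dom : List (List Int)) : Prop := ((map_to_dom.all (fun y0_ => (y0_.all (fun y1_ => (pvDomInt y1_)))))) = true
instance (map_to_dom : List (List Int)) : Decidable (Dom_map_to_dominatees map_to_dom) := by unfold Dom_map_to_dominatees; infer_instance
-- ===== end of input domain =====

-- B replaces A's nested dominator-by-node membership scan with a single pass that inverts
-- each node's dominator set directly into per-dominator buckets (objective: alternative).

-- ===== PORT A =====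
-- A: defaultdict(set); for dominator in range(n_v): for v_j in range(n_v):
--      if dominator in map_to_dom[v_j]: d[dominator].add(v_j);  return dict(d)
def map_to_dominatees (map_to_dom : List (List Int)) : List (Int × List Int) :=
  let n_v := map_to_dom.length
  let d : PySem.Dict Int (List Int) :=
    (List.range n_v).foldl (fun d (dominator : Nat) =>
      (List.range n_v).foldl (fun d (v_j : Nat) =>
        if (dominator : Int) ∈ PySem.List.pyGetD map_to_dom (v_j : Int) [] then
          d.modify (dominator : Int) [] (fun s => PySem.Set.add s (v_j : Int))
        else d) d) PySem.Dict.empty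
  d.items

-- ===== PORT B =====
-- B: buckets = [set() for _ in range(n_v)]; for v_j, doms in enumerate(map_to_dom):
--      for d in doms: if 0 <= d < n_v: buckets[d].add(v_j)
--    return {d: b for d, b in enumerate(buckets) if b}
def map_to_dominatees_alt (map_to_dom : List (List Int)) : List (Int × List Int) :=
  let n_v := map_to_dom.length
  let buckets : List (PySem.Set Int) :=
    (PySem.List.enumerate map_to_dom).foldl (fun bk p =>
      p.2.foldl (fun bk d =>
        if 0 ≤ d ∧ d < (n_v : Int) then
          bk.set d.toNat (PySem.Set.add (bk.getD d.toNat []) p.1)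
        else bk) bk)
      (List.replicate n_v PySem.Set.empty)
  (PySem.List.enumerate buckets).filterMap (fun p => if p.2 = [] then none else some (p.1, p.2))

-- ===== PRECONDITION & SPEC =====
def Spec_map_to_dominatees (map_to_dom : List (List Int)) (out : List (Int × List Int)) : Prop := out = map_to_dominatees_alt map_to_dom
instance (map_to_dom : List (List Int)) (out : List (Int × List Int)) : Decidable (Spec_map_to_dominatees map_to_dom out) := by unfold Spec_map_to_dominatees; infer_instance

-- ===== CLAIM (what is proved, stated in full; the proofs are below) =====
def Claim_equal_map_to_dominatees : Prop := ∀ (map_to_dom : List (List Int)), Dom_map_to_dominatees map_to_dom → Spec_map_to_dominatees map_to_dom (map_to_dominatees map_to_dom)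

-- ===== LEMMAS AND PROOFS =====

-- pvVs m d = the (ascending) list of nodes dominated by d; pvCanon m = the common result.
def pvVs (m : List (List Int)) (dN : Nat) : List Int :=
  ((List.range m.length).filter (fun v => decide ((dN : Int) ∈ m.getD v []))).map (fun v => ((v : Nat) : Int))

def pvCanon (m : List (List Int)) : List (Int × List Int) :=
  (List.range m.length).filterMap (fun dN => if pvVs m dN = [] then none else some (((dN : Nat) : Int), pvVs m dN))

lemma pvVs_nodup (m : List (List Int)) (dN : Nat) : (pvVs m dN).Nodup := by
  exact ((List.nodup_range).filter _).map (fun a b h => by exact_mod_cast h)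

-- A's inner loop over a nonempty list of matching nodes is one insert of the accumulated set.
lemma pvA_modify_run (k : Int) (f : Nat → Int) :
    ∀ (L : List Nat) (d : PySem.Dict Int (List Int)), L ≠ [] →
      L.foldl (fun d v => d.modify k [] (fun s => PySem.Set.add s (f v))) d
        = d.insert k (PySem.Set.update (d.getD k []) (L.map f)) := by
  intro L
  induction L with
  | nil => intro d h; exact absurd rfl h
  | cons v L ih =>
    intro d _
    by_cases hL : L = []
    · subst hL
      simp [PySem.Dict.modify, PySem.Set.update_cons, PySem.Set.update_nil]
    · simp only [List.foldl_cons, List.map_cons, PySem.Set.update_cons]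
      rw [ih _ hL]
      rw [PySem.Dict.modify, PySem.Dict.getD_insert_self, PySem.Dict.insert_insert_self]

-- A's outer loop builds exactly the prefix of pvCanon.
lemma pvA_loop (m : List (List Int)) :
    ∀ (k : Nat),
      (((List.range k).foldl (fun d (dominator : Nat) =>
          (List.range m.length).foldl (fun d (v_j : Nat) =>
            if (dominator : Int) ∈ m.getD v_j [] then
              d.modify (dominator : Int) [] (fun s => PySem.Set.add s ((v_j : Nat) : Int))
            else d) d) PySem.Dict.empty)).items
        = (List.range k).filterMap (fun dN => if pvVs m dN = [] then none else some (((dN : Nat) : Int), pvVs m dN)) := by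
  intro k
  induction k with
  | zero => simp [PySem.Dict.empty]
  | succ k ih =>
    rw [List.range_succ, List.foldl_append, List.filterMap_append, List.foldl_cons, List.foldl_nil]
    set P := ((List.range k).foldl (fun d (dominator : Nat) =>
          (List.range m.length).foldl (fun d (v_j : Nat) =>
            if (dominator : Int) ∈ m.getD v_j [] then
              d.modify (dominator : Int) [] (fun s => PySem.Set.add s ((v_j : Nat) : Int))
            else d) d) PySem.Dict.empty) with hP
    have hfresh : P.contains ((k : Nat) : Int) = false := by
      rw [PySem.Dict.contains_eq_decide_mem_keys]
      simp only [decide_eq_false_iff_not, PySem.Dict.keys, ih]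
      intro hmem
      rcases List.mem_map.mp hmem with ⟨p, hp, hfst⟩
      rcases List.mem_filterMap.mp hp with ⟨dN, hdN, hsome⟩
      have hdk : dN < k := List.mem_range.mp hdN
      by_cases hv : pvVs m dN = []
      · simp [hv] at hsome
      · rw [if_neg hv] at hsome
        cases hsome
        have : ((dN : Nat) : Int) = ((k : Nat) : Int) := hfst
        omega
    rw [PySem.List.foldl_ite_eq_foldl_filter
      (p := fun v_j => (k : Int) ∈ m.getD v_j [])
      (f := fun d (v_j : Nat) => PySem.Dict.modify d (k : Int) [] (fun s => PySem.Set.add s ((v_j : Nat) : Int)))]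
    set L := (List.range m.length).filter (fun v => decide ((k : Int) ∈ m.getD v [])) with hLdef
    have hVsL : pvVs m k = L.map (fun v => ((v : Nat) : Int)) := rfl
    by_cases hL : L = []
    · have hVs : pvVs m k = [] := by rw [hVsL, hL]; rfl
      rw [hL, List.foldl_nil, ih]
      simp [hVs]
    · rw [pvA_modify_run _ _ _ _ hL]
      rw [PySem.Dict.getD_of_not_contains _ _ hfresh, PySem.Set.update_nil_left, ← hVsL]
      rw [PySem.Set.ofList_eq_self_of_nodup _ (pvVs_nodup m k)]
      rw [PySem.Dict.items_insert_of_not_contains _ _ hfresh, ih]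
      have hVs' : pvVs m k ≠ [] := by
        rw [hVsL]; simpa [List.map_eq_nil_iff] using hL
      simp [hVs']

lemma pvA_eq_canon (m : List (List Int)) : map_to_dominatees m = pvCanon m := by
  unfold map_to_dominatees pvCanon
  simp only [PySem.List.pyGetD_natCast]
  exact pvA_loop m m.length

-- B side.  One row: the bucket at dN gains vj exactly when dN occurs among the row's dominators.
lemma pvB_row (n : Nat) (vj : Int) :
    ∀ (doms : List Int) (bk : List (PySem.Set Int)), bk.length = n →
      ((doms.foldl (fun bk d =>
          if 0 ≤ d ∧ d < (n : Int) then
            bk.set d.toNat (PySem.Set.add (bk.getD d.toNat []) vj)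
          else bk) bk).length = n
      ∧ ∀ dN : Nat, dN < n →
          (doms.foldl (fun bk d =>
            if 0 ≤ d ∧ d < (n : Int) then
              bk.set d.toNat (PySem.Set.add (bk.getD d.toNat []) vj)
            else bk) bk).getD dN []
          = if (dN : Int) ∈ doms then PySem.Set.add (bk.getD dN []) vj else bk.getD dN []) := by
  intro doms
  induction doms with
  | nil => intro bk hlen; exact ⟨hlen, fun dN _ => by simp⟩
  | cons d doms ih =>
    intro bk hlen
    by_cases hrange : 0 ≤ d ∧ d < (n : Int)
    · have hlen' : (bk.set d.toNat (PySem.Set.add (bk.getD d.toNat []) vj)).length = n := by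
        simpa using hlen
      obtain ⟨ihlen, ihget⟩ := ih _ hlen'
      refine ⟨by simpa [hrange] using ihlen, ?_⟩
      intro dN hdN
      simp only [List.foldl_cons, if_pos hrange]
      rw [ihget dN hdN]
      by_cases hd : (dN : Int) = d
      · have htoNat : d.toNat = dN := by omega
        have hset : (bk.set d.toNat (PySem.Set.add (bk.getD d.toNat []) vj)).getD dN []
            = PySem.Set.add (bk.getD dN []) vj := by
          subst htoNat
          rw [List.getD_eq_getElem?_getD, List.getElem?_set_self (by omega)]
          simp
        rw [hset]
        simp [hd]
      · have hne : d.toNat ≠ dN := by omega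
        have hset : (bk.set d.toNat (PySem.Set.add (bk.getD d.toNat []) vj)).getD dN []
            = bk.getD dN [] := by
          rw [List.getD_eq_getElem?_getD, List.getElem?_set_ne hne, ← List.getD_eq_getElem?_getD]
        rw [hset]
        simp [List.mem_cons, hd]
    · obtain ⟨ihlen, ihget⟩ := ih _ hlen
      refine ⟨by simpa [hrange] using ihlen, ?_⟩
      intro dN hdN
      simp only [List.foldl_cons, if_neg hrange]
      rw [ihget dN hdN]
      have hd : (dN : Int) ≠ d := by
        intro h; exact hrange ⟨by omega, by omega⟩
      simp [List.mem_cons, hd]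

-- All rows, pointwise on buckets.
lemma pvB_rows (n : Nat) :
    ∀ (rows : List (Int × List Int)) (bk : List (PySem.Set Int)), bk.length = n →
      ((rows.foldl (fun bk p =>
          p.2.foldl (fun bk d =>
            if 0 ≤ d ∧ d < (n : Int) then
              bk.set d.toNat (PySem.Set.add (bk.getD d.toNat []) p.1)
            else bk) bk) bk).length = n
      ∧ ∀ dN : Nat, dN < n →
          (rows.foldl (fun bk p =>
            p.2.foldl (fun bk d =>
              if 0 ≤ d ∧ d < (n : Int) then
                bk.set d.toNat (PySem.Set.add (bk.getD d.toNat []) p.1)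
              else bk) bk) bk).getD dN []
          = rows.foldl (fun s p => if (dN : Int) ∈ p.2 then PySem.Set.add s p.1 else s) (bk.getD dN [])) := by
  intro rows
  induction rows with
  | nil => intro bk hlen; exact ⟨hlen, fun dN _ => by simp⟩
  | cons p rows ih =>
    intro bk hlen
    obtain ⟨rlen, rget⟩ := pvB_row n p.1 p.2 bk hlen
    obtain ⟨ihlen, ihget⟩ := ih _ rlen
    refine ⟨ihlen, ?_⟩
    intro dN hdN
    simp only [List.foldl_cons]
    rw [ihget dN hdN, rget dN hdN]

-- Column dN of the inversion, accumulated over the enumerated rows, is pvVs.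
lemma pvB_col (dN : Nat) :
    ∀ (rows : List (List Int)) (j : Nat) (s : List Int),
      (∀ x ∈ s, ∃ v : Nat, x = ((v : Nat) : Int) ∧ v < j) →
      (PySem.List.enumerate rows ((j : Nat) : Int)).foldl
          (fun s p => if (dN : Int) ∈ p.2 then PySem.Set.add s p.1 else s) s
        = s ++ ((List.range rows.length).filter (fun v => decide ((dN : Int) ∈ rows.getD v []))).map
            (fun v => (((j + v : Nat) : Nat) : Int)) := by
  intro rows
  induction rows with
  | nil => intro j s _; simp [PySem.List.enumerate]
  | cons r rows ih =>
    intro j s hs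
    have hnot : ((j : Nat) : Int) ∉ s := by
      intro hmem
      rcases hs _ hmem with ⟨v, hv, hvj⟩
      have : v = j := by exact_mod_cast hv.symm
      omega
    have hstep : ∀ s' : List Int, (∀ x ∈ s', ∃ v : Nat, x = ((v : Nat) : Int) ∧ v < j + 1) →
        (PySem.List.enumerate rows (((j : Nat) : Int) + 1)).foldl
            (fun s p => if (dN : Int) ∈ p.2 then PySem.Set.add s p.1 else s) s'
          = s' ++ ((List.range rows.length).filter (fun v => decide ((dN : Int) ∈ rows.getD v []))).map
              (fun v => ((((j + 1) + v : Nat) : Nat) : Int)) := by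
      intro s' hs'
      have hc : (((j + 1 : Nat) : Nat) : Int) = ((j : Nat) : Int) + 1 := by push_cast; ring
      rw [← hc]
      exact ih (j + 1) s' hs'
    simp only [PySem.List.enumerate, List.foldl_cons]
    by_cases hmem : (dN : Int) ∈ r
    · have hadd : PySem.Set.add s ((j : Nat) : Int) = s ++ [((j : Nat) : Int)] :=
        PySem.Set.add_of_not_mem hnot
      rw [if_pos hmem, hadd, hstep (s ++ [((j : Nat) : Int)]) ?side]
      case side =>
        intro x hx
        rcases List.mem_append.mp hx with hx | hx
        · rcases hs _ hx with ⟨v, hv, hvj⟩; exact ⟨v, hv, by omega⟩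
        · simp at hx; exact ⟨j, hx, by omega⟩
      have hd0 : decide ((dN : Int) ∈ (r :: rows).getD 0 []) = true := by simpa using hmem
      simp only [List.length_cons, List.range_succ_eq_map, List.filter_cons, hd0, if_true,
        List.filter_map, List.map_cons, List.map_map, Function.comp_def, List.getD_cons_succ,
        Nat.succ_eq_add_one, Nat.add_zero, List.append_assoc, List.singleton_append]
      congr 1
      congr 1
      apply List.map_congr_left
      intro v _
      exact congrArg _ (by omega)
    · rw [if_neg hmem, hstep s (fun x hx => by rcases hs _ hx with ⟨v, hv, hvj⟩; exact ⟨v, hv, by omega⟩)]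
      have hd0 : decide ((dN : Int) ∈ (r :: rows).getD 0 []) = false := by simpa using hmem
      simp only [List.length_cons, List.range_succ_eq_map, List.filter_cons, hd0, Bool.false_eq_true,
        if_false, List.filter_map, List.map_map, Function.comp_def, List.getD_cons_succ,
        Nat.succ_eq_add_one]
      congr 1
      apply List.map_congr_left
      intro v _
      exact congrArg _ (by omega)

-- enumerate of any list, as a map over range.
lemma pvEnum_eq (l : List (List Int)) :
    ∀ (j : Nat), PySem.List.enumerate l ((j : Nat) : Int)
      = (List.range l.length).map (fun i => (((j + i : Nat) : Int), l.getD i [])) := by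
  induction l with
  | nil => intro j; simp [PySem.List.enumerate]
  | cons r l ih =>
    intro j
    have hc : (((j + 1 : Nat) : Nat) : Int) = ((j : Nat) : Int) + 1 := by push_cast; ring
    simp only [PySem.List.enumerate]
    rw [← hc, ih (j + 1), List.length_cons, List.range_succ_eq_map, List.map_cons, List.map_map]
    refine List.cons_eq_cons.mpr ⟨by simp, ?_⟩
    simp only [List.map_inj_left, Function.comp_def, List.getD_cons_succ, Nat.succ_eq_add_one,
      Prod.mk.injEq]
    intro v _
    exact ⟨by push_cast; ring, trivial⟩

lemma pvB_raw (m : List (List Int)) :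
    ((PySem.List.enumerate ((PySem.List.enumerate m).foldl (fun bk p =>
        p.2.foldl (fun bk d =>
          if 0 ≤ d ∧ d < (m.length : Int) then
            bk.set d.toNat (PySem.Set.add (bk.getD d.toNat []) p.1)
          else bk) bk)
        (List.replicate m.length PySem.Set.empty))).filterMap
      (fun p => if p.2 = [] then none else some (p.1, p.2)))
      = pvCanon m := by
  set n := m.length with hn
  set buckets : List (PySem.Set Int) :=
    (PySem.List.enumerate m).foldl (fun bk p =>
      p.2.foldl (fun bk d =>
        if 0 ≤ d ∧ d < (n : Int) then
          bk.set d.toNat (PySem.Set.add (bk.getD d.toNat []) p.1)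
        else bk) bk)
      (List.replicate n PySem.Set.empty) with hbuckets
  have hrepl : (List.replicate n (PySem.Set.empty : PySem.Set Int)).length = n := by simp
  obtain ⟨blen, bget⟩ := pvB_rows n (PySem.List.enumerate m) (List.replicate n PySem.Set.empty) hrepl
  have hblen : buckets.length = n := by rw [hbuckets]; exact blen
  have hbuck_eq : buckets = (List.range n).map (fun dN => pvVs m dN) := by
    apply List.ext_getElem (by simp [hblen])
    intro i h1 h2
    have hi : i < n := by omega
    have hgetD : buckets.getD i [] = pvVs m i := by
      rw [hbuckets, bget i hi]
      have hrg : (List.replicate n (PySem.Set.empty : PySem.Set Int)).getD i [] = [] := by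
        rw [List.getD_eq_getElem?_getD]; simp [hi, PySem.Set.empty]
      rw [hrg]
      have hcol := pvB_col i m 0 [] (by intro x hx; simp at hx)
      have h0 : ((0 : Nat) : Int) = (0 : Int) := rfl
      rw [h0] at hcol
      rw [hcol]
      simp only [List.nil_append, pvVs, ← hn]
      apply List.map_congr_left
      intro v _
      simp
    rw [List.getElem_map]
    have hg : buckets[i] = buckets.getD i [] := (List.getD_eq_getElem _ _ h1).symm
    rw [hg, hgetD]
    congr 1
    exact (List.getElem_range _).symm
  rw [hbuck_eq]
  have henum := pvEnum_eq ((List.range n).map (fun dN => pvVs m dN)) 0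
  have h0 : ((0 : Nat) : Int) = (0 : Int) := rfl
  rw [h0] at henum
  rw [henum]
  simp only [List.length_map, List.length_range, List.filterMap_map]
  unfold pvCanon
  rw [← hn]
  apply List.filterMap_congr
  intro dN hdN
  have hdn : dN < n := List.mem_range.mp hdN
  simp [List.getElem?_range hdn]

lemma pvB_eq_canon (m : List (List Int)) : map_to_dominatees_alt m = pvCanon m := pvB_raw m

-- ===== VERDICT (by name: the statement is the Claim_ definition above) =====
theorem map_to_dominatees_spec : Claim_equal_map_to_dominatees := by
  intro m _
  show map_to_dominatees m = map_to_dominatees_alt m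
  rw [pvA_eq_canon, pvB_eq_canon]
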